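-- pv_equiv track=rewrite | github.com/mquigley/ghidra | Ghidra/Processors/sla_dump.py | _format_instr_bytes
-- ===== SOURCE A (Python) =====
-- def _format_instr_bytes(instr_bytes):
--     """
--     Format instruction byte constraints as a human-readable encoding string.
--
--     Each element is (byte_offset, mask_byte, val_byte).
--     - Exact byte (mask=0xFF): shown as hex, e.g. "F6"
--     - ModRM reg field only (mask=0x38): shown as "/N"
--     - ModRM mod+rm constrained, reg free: shown as "/r"
--     - Other partial: shown as "byte[N]&MM=VV"
--     """
--     if not instr_bytes:
--         return None
--
--     # Group by byte offset, consolidate masks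
--     by_off = {}
--     for off, m, v in instr_bytes:
--         if off not in by_off:
--             by_off[off] = (m, v)
--         else:
--             pm, pv = by_off[off]
--             by_off[off] = (pm | m, pv | (v & m))
--
--     parts = []
--     for off in sorted(by_off):
--         m, v = by_off[off]
--         if m == 0xff:
--             parts.append('%02X' % v)
--         else:
--             # ModRM reg field (bits 5:3 = mask 0x38), mod+rm unconstrained
--             if (m & 0x38) == 0x38 and (m & 0xc7) == 0:
--                 reg_val = (v >> 3) & 7
--                 parts.append('/%d' % reg_val)
--             # ModRM: mod+rm constrained, reg field free -> /r
--             elif (m & 0xc7) == 0xc7 and (m & 0x38) == 0: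
--                 parts.append('/r')
--             # ModRM: full reg field + some mod/rm bits
--             elif (m & 0x38) == 0x38:
--                 reg_val = (v >> 3) & 7
--                 modrm_m = m & 0xc7
--                 modrm_v = v & 0xc7
--                 if modrm_m == 0xc0 and modrm_v == 0xc0:
--                     # mod=11 (register mode), rm varies -> register-only form
--                     parts.append('/%d(reg)' % reg_val)
--                 elif (~m & 0xff) == 0x07:
--                     # Only low 3 bits free: opcode byte with embedded register
--                     # e.g. 0x50+rd (PUSH), 0x58+rd (POP), 0xB8+rd (MOV reg,imm)
--                     parts.append('%02X+r' % v)
--                 else: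
--                     parts.append('byte[%d]&%02X=%02X' % (off, m, v))
--             else:
--                 # Generic partial
--                 parts.append('byte[%d]&%02X=%02X' % (off, m, v))
--     return ' '.join(parts) if parts else None
-- ===== SOURCE B (Python) =====
-- def _fmt(off, m, v):
--     hi = m & 0x38
--     lo = m & 0xc7
--     if m == 0xff:
--         return '%02X' % v
--     if hi == 0x38:
--         if lo == 0:
--             return '/%d' % ((v >> 3) & 7)
--         if lo == 0xc0 and (v & 0xc7) == 0xc0:
--             return '/%d(reg)' % ((v >> 3) & 7)
--         if (~m & 0xff) == 0x07:
--             return '%02X+r' % v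
--     elif lo == 0xc7 and hi == 0:
--         return '/r'
--     return 'byte[%d]&%02X=%02X' % (off, m, v)
--
--
-- def _format_instr_bytes(instr_bytes):
--     if not instr_bytes:
--         return None
--     parts = []
--     rest = instr_bytes
--     while rest:
--         off = min(t[0] for t in rest)
--         group = [(m, v) for o, m, v in rest if o == off]
--         m, v = group[0]
--         for em, ev in group[1:]:
--             m, v = m | em, v | (ev & em)
--         parts.append(_fmt(off, m, v))
--         rest = [t for t in rest if t[0] != off]
--     return ' '.join(parts)
-- ===== Notes on version B (the rewrite author's own statement) =====
-- stated objective: alternative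
-- what changed: Replaces A's dict-grouping pass plus sorted-keys formatting loop with a selection loop that repeatedly extracts the minimum remaining offset, consolidates that offset's entries in order and filters them out, with the formatting ladder restructured around precomputed reg-field/mod-rm-field masks.
import Mathlib
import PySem

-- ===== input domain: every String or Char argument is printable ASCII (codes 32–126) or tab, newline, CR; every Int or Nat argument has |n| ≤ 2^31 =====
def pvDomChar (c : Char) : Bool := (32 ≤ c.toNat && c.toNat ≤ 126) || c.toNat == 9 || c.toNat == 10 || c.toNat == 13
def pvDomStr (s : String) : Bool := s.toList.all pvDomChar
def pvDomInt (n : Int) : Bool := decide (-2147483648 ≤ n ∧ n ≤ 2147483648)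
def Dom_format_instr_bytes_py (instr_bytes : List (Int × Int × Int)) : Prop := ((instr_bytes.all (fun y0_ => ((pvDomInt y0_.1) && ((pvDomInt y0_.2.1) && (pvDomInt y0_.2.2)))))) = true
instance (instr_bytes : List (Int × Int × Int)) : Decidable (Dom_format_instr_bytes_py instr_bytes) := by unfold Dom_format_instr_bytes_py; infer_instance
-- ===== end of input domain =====

-- B replaces A's dict-grouping-then-sort pass by selection: repeatedly extract the minimum
-- remaining offset, consolidate its entries in order and drop them (alternative decomposition;
-- B's formatter is also restructured around precomputed hi/lo mask fields).

-- ===== PORT A =====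
-- '%02X' formatting, shared by both ports as a primitive: hex digits of a natural number,
-- then Python's '%02X' rule (sign first, zero-pad to overall width 2)
def pvHexDigit (n : Nat) : Char :=
  (['0','1','2','3','4','5','6','7','8','9','A','B','C','D','E','F']).getD n '0'

def pvNatHexAux : Nat → Nat → List Char
  | 0, _ => []
  | f+1, n => if n < 16 then [pvHexDigit n] else pvNatHexAux f (n/16) ++ [pvHexDigit (n % 16)]

def pvNatHex (n : Nat) : List Char := pvNatHexAux (n+1) n

def pvHex2 (v : Int) : List Char :=
  if v < 0 then '-' :: pvNatHex v.natAbs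
  else if v < 16 then '0' :: pvNatHex v.toNat
  else pvNatHex v.toNat

-- A's formatting ladder, branch for branch ('%02X', '/N', '/r', '/N(reg)', 'XX+r', 'byte[N]&MM=VV')
def pvFmtA (off m v : Int) : String :=
  if m = 0xff then String.ofList (pvHex2 v)
  else if PySem.Int.band m 0x38 = 0x38 ∧ PySem.Int.band m 0xc7 = 0 then
    String.ofList ('/' :: PySem.Int.toChars (PySem.Int.band (v >>> (3:Nat)) 7))
  else if PySem.Int.band m 0xc7 = 0xc7 ∧ PySem.Int.band m 0x38 = 0 then
    String.ofList ['/', 'r']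
  else if PySem.Int.band m 0x38 = 0x38 then
    let regVal := PySem.Int.band (v >>> (3:Nat)) 7
    let modrmM := PySem.Int.band m 0xc7
    let modrmV := PySem.Int.band v 0xc7
    if modrmM = 0xc0 ∧ modrmV = 0xc0 then
      String.ofList ('/' :: PySem.Int.toChars regVal ++ ['(', 'r', 'e', 'g', ')'])
    else if PySem.Int.band (Int.not m) 0xff = 0x07 then
      String.ofList (pvHex2 v ++ ['+', 'r'])
    else
      String.ofList (['b','y','t','e','['] ++ PySem.Int.toChars off ++ [']', '&'] ++ pvHex2 m ++ ['='] ++ pvHex2 v)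
  else
    String.ofList (['b','y','t','e','['] ++ PySem.Int.toChars off ++ [']', '&'] ++ pvHex2 m ++ ['='] ++ pvHex2 v)

-- the dict-building loop body of A
def pvAStep (d : PySem.Dict Int (Int × Int)) (t : Int × Int × Int) : PySem.Dict Int (Int × Int) :=
  if d.contains t.1 = false then
    d.insert t.1 (t.2.1, t.2.2)
  else
    let pm := (d.getD t.1 (0, 0)).1
    let pv := (d.getD t.1 (0, 0)).2
    d.insert t.1 (PySem.Int.bor pm t.2.1, PySem.Int.bor pv (PySem.Int.band t.2.2 t.2.1))

def format_instr_bytes_py (instr_bytes : List (Int × Int × Int)) : Option String :=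
  if instr_bytes.isEmpty then none
  else
    let by_off : PySem.Dict Int (Int × Int) := instr_bytes.foldl pvAStep PySem.Dict.empty
    let parts : List String :=
      (PySem.List.sorted by_off.keys (fun x => x) false).foldl
        (fun acc off =>
          let mv := by_off.getD off (0, 0)
          acc ++ [pvFmtA off mv.1 mv.2]) []
    if parts.isEmpty then none else some (PySem.Str.join " " parts)

-- ===== PORT B =====
-- B's generic fall-through 'byte[N]&MM=VV'
def pvGeneric (off m v : Int) : String :=
  String.ofList (['b','y','t','e','['] ++ PySem.Int.toChars off ++ [']', '&'] ++ pvHex2 m ++ ['='] ++ pvHex2 v)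

-- B's _fmt: classify by the precomputed reg-field (hi) and mod/rm-field (lo) masks
def pvFmtB (off m v : Int) : String :=
  let hi := PySem.Int.band m 0x38
  let lo := PySem.Int.band m 0xc7
  if m = 0xff then String.ofList (pvHex2 v)
  else if hi = 0x38 then
    if lo = 0 then
      String.ofList ('/' :: PySem.Int.toChars (PySem.Int.band (v >>> (3:Nat)) 7))
    else if lo = 0xc0 ∧ PySem.Int.band v 0xc7 = 0xc0 then
      String.ofList ('/' :: PySem.Int.toChars (PySem.Int.band (v >>> (3:Nat)) 7) ++ ['(', 'r', 'e', 'g', ')'])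
    else if PySem.Int.band (Int.not m) 0xff = 0x07 then
      String.ofList (pvHex2 v ++ ['+', 'r'])
    else pvGeneric off m v
  else if lo = 0xc7 ∧ hi = 0 then String.ofList ['/', 'r']
  else pvGeneric off m v

-- B's consolidation step: m, v = m | em, v | (ev & em)
def pvGroupStep (p : Int × Int) (q : Int × Int) : Int × Int :=
  (PySem.Int.bor p.1 q.1, PySem.Int.bor p.2 (PySem.Int.band q.2 q.1))

-- termination fact for B's while loop: filtering out the minimal offset shrinks the list
lemma pvFilterMin_lt (t : Int × Int × Int) (ts : List (Int × Int × Int)) :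
    ((t :: ts).filter
      (fun u => u.1 != (PySem.List.min? ((t :: ts).map (·.1)) (fun x => x)).getD 0)).length
      < (t :: ts).length := by
  have hne : ((t :: ts).map (·.1)) ≠ [] := by simp
  obtain ⟨o, ho⟩ : ∃ o, PySem.List.min? ((t :: ts).map (·.1)) (fun x => x) = some o := by
    cases h : PySem.List.min? ((t :: ts).map (·.1)) (fun x => x) with
    | none => exact absurd ((PySem.List.min?_eq_none_iff _ _).mp h) hne
    | some o => exact ⟨o, rfl⟩
  have hmem : o ∈ (t :: ts).map (·.1) := PySem.List.min?_mem ho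
  obtain ⟨u, hu, hu1⟩ := List.mem_map.mp hmem
  refine List.length_filter_lt_length_iff_exists.mpr ⟨u, hu, ?_⟩
  rw [ho]
  simp [hu1]

-- B's while loop: take the minimal remaining offset, consolidate its group, drop it, repeat
def pvPartsB : List (Int × Int × Int) → List String
  | [] => []
  | t :: ts =>
    let off := (PySem.List.min? ((t :: ts).map (·.1)) (fun x => x)).getD 0
    let group := ((t :: ts).filter (fun u => u.1 == off)).map (fun u => (u.2.1, u.2.2))
    let mv : Int × Int :=
      match group with
      | [] => (0, 0)   -- unreachable: the minimal offset occurs in the list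
      | g :: gs => gs.foldl pvGroupStep g
    pvFmtB off mv.1 mv.2 :: pvPartsB ((t :: ts).filter (fun u => u.1 != off))
termination_by l => l.length
decreasing_by exact pvFilterMin_lt t ts

def format_instr_bytes_py_alt (instr_bytes : List (Int × Int × Int)) : Option String :=
  if instr_bytes.isEmpty then none
  else some (PySem.Str.join " " (pvPartsB instr_bytes))

-- ===== PRECONDITION & SPEC =====
def Spec_format_instr_bytes_py (instr_bytes : List (Int × Int × Int)) (out : Option String) : Prop := out = format_instr_bytes_py_alt instr_bytes
instance (instr_bytes : List (Int × Int × Int)) (out : Option String) : Decidable (Spec_format_instr_bytes_py instr_bytes out) := by unfold Spec_format_instr_bytes_py; infer_instance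

-- ===== CLAIM (what is proved, stated in full; the proofs are below) =====
def Claim_equal_format_instr_bytes_py : Prop := ∀ (instr_bytes : List (Int × Int × Int)), Dom_format_instr_bytes_py instr_bytes → Spec_format_instr_bytes_py instr_bytes (format_instr_bytes_py instr_bytes)

-- ===== LEMMAS AND PROOFS =====

-- the two formatters agree: B's hi/lo nesting is A's ladder
lemma pvFmt_eq (off m v : Int) : pvFmtA off m v = pvFmtB off m v := by
  unfold pvFmtA pvFmtB pvGeneric
  by_cases h1 : m = 0xff
  · simp [h1]
  · by_cases h2 : PySem.Int.band m 0x38 = 0x38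
    · by_cases h3 : PySem.Int.band m 0xc7 = 0
      · simp [h1, h2, h3]
      · by_cases h4 : PySem.Int.band m 0xc7 = 0xc0 ∧ PySem.Int.band v 0xc7 = 0xc0
        · simp [h1, h2, h4]
        · by_cases h5 : PySem.Int.band (Int.not m) 0xff = 0x07
          · simp [h1, h2, h3, h4, h5]
          · simp [h1, h2, h3, h4, h5]
    · by_cases h3 : PySem.Int.band m 0xc7 = 0xc7 ∧ PySem.Int.band m 0x38 = 0
      · simp [h1, h3]
      · simp [h1, h2, h3]

-- the canonical consolidated (m, v) of one offset: fold A's rule over the entries in order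
def pvMV (l : List (Int × Int × Int)) (off : Int) : Int × Int :=
  match (l.filter (fun u => u.1 == off)).map (fun u => (u.2.1, u.2.2)) with
  | [] => (0, 0)
  | g :: gs => gs.foldl pvGroupStep g

-- === A-side: the dict holds exactly the canonical consolidation, keys in first-occurrence order ===
def pvStepOpt (o : Option (Int × Int)) (q : Int × Int) : Option (Int × Int) :=
  match o with
  | none => some q
  | some p => some (pvGroupStep p q)

lemma pvAStep_eq (d : PySem.Dict Int (Int × Int)) (t : Int × Int × Int) :
    pvAStep d t = d.insert t.1
      (if d.contains t.1 = false then (t.2.1, t.2.2)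
       else pvGroupStep (d.getD t.1 (0, 0)) (t.2.1, t.2.2)) := by
  unfold pvAStep pvGroupStep; split <;> rfl

lemma pvAStep_get? (d : PySem.Dict Int (Int × Int)) (t : Int × Int × Int) (off : Int) :
    (pvAStep d t).get? off =
      if t.1 = off then pvStepOpt (d.get? off) (t.2.1, t.2.2) else d.get? off := by
  rw [pvAStep_eq, PySem.Dict.get?_insert]
  by_cases h : off = t.1
  · rw [if_pos h, if_pos h.symm]
    cases hc : d.contains t.1 with
    | false =>
      have hn : d.get? t.1 = none := by
        have hh := PySem.Dict.contains_eq_isSome_get? d t.1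
        rw [hc] at hh
        exact Option.not_isSome_iff_eq_none.mp (by simp [← hh])
      rw [h, hn]
      simp [pvStepOpt]
    | true =>
      have hs : (d.get? t.1).isSome := by
        have hh := PySem.Dict.contains_eq_isSome_get? d t.1
        rw [hc] at hh
        exact hh.symm ▸ rfl
      obtain ⟨p, hp⟩ := Option.isSome_iff_exists.mp hs
      have hd : d.getD t.1 (0, 0) = p := PySem.Dict.getD_of_get?_eq_some d (0, 0) hp
      rw [h, hp]
      simp [pvStepOpt, hd]
  · rw [if_neg h, if_neg (fun hh => h hh.symm)]

lemma pvFold_get? (l : List (Int × Int × Int)) (d : PySem.Dict Int (Int × Int)) (off : Int) :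
    (l.foldl pvAStep d).get? off =
      ((l.filter (fun t => t.1 == off)).map (fun t => (t.2.1, t.2.2))).foldl pvStepOpt (d.get? off) := by
  induction l generalizing d with
  | nil => rfl
  | cons t l ih =>
    simp only [List.foldl_cons, ih, List.filter_cons]
    by_cases h : t.1 = off
    · simp [h, pvAStep_get? d t off]
    · simp [h, pvAStep_get? d t off]

lemma pvStepOpt_foldl_some (es : List (Int × Int)) (p : Int × Int) :
    es.foldl pvStepOpt (some p) = some (es.foldl pvGroupStep p) := by
  induction es generalizing p with
  | nil => rfl
  | cons q es ih => simp [pvStepOpt, List.foldl_cons, ih]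

lemma pvKeys_fold (l : List (Int × Int × Int)) :
    (l.foldl pvAStep PySem.Dict.empty).keys = PySem.List.dedup (l.map (·.1)) := by
  have hfun : pvAStep = fun (d : PySem.Dict Int (Int × Int)) (t : Int × Int × Int) =>
      d.insert t.1
        (if d.contains t.1 = false then (t.2.1, t.2.2)
         else pvGroupStep (d.getD t.1 (0, 0)) (t.2.1, t.2.2)) :=
    funext fun d => funext fun t => pvAStep_eq d t
  rw [hfun, PySem.Dict.keys_foldl_insert_key]
  simp [PySem.Dict.keys_empty, PySem.Set.update_nil_left]

lemma pvDedup_ne_nil (l : List (Int × Int × Int)) (h : l ≠ []) :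
    PySem.List.dedup (l.map (·.1)) ≠ [] := by
  cases l with
  | nil => exact absurd rfl h
  | cons t l =>
    intro hc
    have : t.1 ∈ PySem.List.dedup ((t :: l).map (·.1)) := by simp
    rw [hc] at this
    exact absurd this (List.not_mem_nil)

-- getD of the A-dict at a key that occurs is the canonical consolidation
lemma pvGetD_fold (l : List (Int × Int × Int)) (off : Int)
    (h : off ∈ l.map (·.1)) :
    (l.foldl pvAStep PySem.Dict.empty).getD off (0, 0) = pvMV l off := by
  obtain ⟨u, hu, hu1⟩ := List.mem_map.mp h
  have hufil : u ∈ l.filter (fun t => t.1 == off) := by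
    rw [List.mem_filter]; exact ⟨hu, by simp [hu1]⟩
  have hne : (l.filter (fun t => t.1 == off)).map (fun t => (t.2.1, t.2.2)) ≠ [] := by
    intro hc
    have := List.mem_map_of_mem (f := fun (t : Int × Int × Int) => (t.2.1, t.2.2)) hufil
    rw [hc] at this
    exact absurd this (List.not_mem_nil)
  obtain ⟨e, rest, hcase⟩ := List.exists_cons_of_ne_nil hne
  have hget : (l.foldl pvAStep PySem.Dict.empty).get? off = some (rest.foldl pvGroupStep e) := by
    rw [pvFold_get? l PySem.Dict.empty off, PySem.Dict.get?_empty, hcase, List.foldl_cons]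
    exact pvStepOpt_foldl_some rest e
  rw [PySem.Dict.getD_of_get?_eq_some _ (0, 0) hget]
  unfold pvMV
  rw [hcase]

-- A on a nonempty list is the join of the canonical parts over the sorted distinct offsets
lemma pvA_canonical (t : Int × Int × Int) (l : List (Int × Int × Int)) :
    format_instr_bytes_py (t :: l) =
      some (PySem.Str.join " "
        ((PySem.List.sorted (PySem.List.dedup ((t :: l).map (·.1))) (fun x => x) false).map
          (fun off => pvFmtA off (pvMV (t :: l) off).1 (pvMV (t :: l) off).2))) := by
  unfold format_instr_bytes_py
  simp only [List.isEmpty_cons, Bool.false_eq_true, if_false]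
  set D := (t :: l).foldl pvAStep PySem.Dict.empty with hD
  have hkeys : D.keys = PySem.List.dedup ((t :: l).map (·.1)) := pvKeys_fold (t :: l)
  have hfold : (PySem.List.sorted D.keys (fun x => x) false).foldl
      (fun acc off => acc ++ [pvFmtA off (D.getD off (0, 0)).1 (D.getD off (0, 0)).2]) [] =
      (PySem.List.sorted D.keys (fun x => x) false).map
        (fun off => pvFmtA off (D.getD off (0, 0)).1 (D.getD off (0, 0)).2) := by
    rw [PySem.List.foldl_append_singleton_eq_map, List.nil_append]
  rw [hfold]
  have hcong : (PySem.List.sorted D.keys (fun x => x) false).map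
      (fun off => pvFmtA off (D.getD off (0, 0)).1 (D.getD off (0, 0)).2) =
      (PySem.List.sorted (PySem.List.dedup ((t :: l).map (·.1))) (fun x => x) false).map
        (fun off => pvFmtA off (pvMV (t :: l) off).1 (pvMV (t :: l) off).2) := by
    rw [hkeys]
    apply List.map_congr_left
    intro off hoff
    have hmem : off ∈ (t :: l).map (·.1) :=
      (PySem.List.mem_dedup _ _).mp ((PySem.List.mem_sorted _ _ _ _).mp hoff)
    rw [hD, pvGetD_fold (t :: l) off hmem]
  rw [hcong]
  have hnil : PySem.List.sorted (PySem.List.dedup ((t :: l).map (·.1))) (fun x => x) false ≠ [] := by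
    intro hc
    exact pvDedup_ne_nil (t :: l) (by simp) ((PySem.List.sorted_eq_nil_iff _ _ _).mp hc)
  have hpe : ((PySem.List.sorted (PySem.List.dedup ((t :: l).map (·.1))) (fun x => x) false).map
      (fun off => pvFmtA off (pvMV (t :: l) off).1 (pvMV (t :: l) off).2)).isEmpty = false := by
    cases hoc : PySem.List.sorted (PySem.List.dedup ((t :: l).map (·.1))) (fun x => x) false with
    | nil => exact absurd hoc hnil
    | cons o os => simp
  rw [hpe]
  simp

-- === B-side: the selection recursion produces the same canonical parts ===

lemma pvMapFst_filter (l : List (Int × Int × Int)) (p : Int → Bool) :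
    (l.filter (fun u => p u.1)).map (·.1) = (l.map (·.1)).filter p := by
  symm
  rw [List.filter_map]
  rfl

lemma pvDedup_filter (xs : List Int) (q : Int → Bool) :
    PySem.List.dedup (xs.filter q) = (PySem.List.dedup xs).filter q := by
  simp only [PySem.List.dedup_eq_ofList]
  induction xs with
  | nil => rfl
  | cons x xs ih =>
    rw [List.filter_cons]
    by_cases hq : q x = true
    · rw [if_pos hq, PySem.Set.ofList_cons, PySem.Set.ofList_cons, PySem.Set.discard,
        PySem.Set.discard, List.filter_cons, hq, if_pos rfl, ih, List.filter_comm]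
    · have hq' : q x = false := by simpa using hq
      rw [if_neg hq, PySem.Set.ofList_cons, PySem.Set.discard, List.filter_cons, hq']
      simp only [Bool.false_eq_true, if_false]
      rw [List.filter_comm, ← ih]
      symm
      apply List.filter_eq_self.mpr
      intro a ha
      have haq : q a = true := (List.mem_filter.mp ((PySem.Set.mem_ofList _ _).mp ha)).2
      have hne : a ≠ x := by
        intro h
        rw [h, hq'] at haq
        exact absurd haq (by simp)
      simp [hne]

-- pulling the minimum to the front of a sorted nodup list
lemma pvSorted_cons_min (K : List Int) (o : Int) (hnd : K.Nodup) (ho : o ∈ K)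
    (hmin : ∀ y ∈ K, o ≤ y) :
    PySem.List.sorted K (fun x => x) false =
      o :: PySem.List.sorted (K.filter (fun x => x != o)) (fun x => x) false := by
  apply PySem.List.sorted_eq_of_perm_of_pairwise_lt
  · have h1 : (PySem.List.sorted (K.filter (fun x => x != o)) (fun x => x) false).Perm
        (K.filter (fun x => x != o)) := PySem.List.sorted_perm _ _ _
    have h2 : K.filter (fun x => x != o) = K.erase o :=
      (List.Nodup.erase_eq_filter hnd o).symm
    have h3 : K.Perm (o :: K.erase o) := List.perm_cons_erase ho
    exact (List.Perm.cons o (h2 ▸ h1)).trans h3.symm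
  · constructor
    · intro y hy
      have hy' : y ∈ K.filter (fun x => x != o) :=
        (PySem.List.mem_sorted _ _ _ _).mp hy
      have hyK : y ∈ K := (List.mem_filter.mp hy').1
      have hyne : y ≠ o := by
        have := (List.mem_filter.mp hy').2
        simpa [bne] using this
      exact lt_of_le_of_ne (hmin y hyK) (Ne.symm hyne)
    · have hle : (PySem.List.sorted (K.filter (fun x => x != o)) (fun x => x) false).Pairwise
          (fun a b => a ≤ b) := PySem.List.sorted_pairwise _ _
      have hndf : (PySem.List.sorted (K.filter (fun x => x != o)) (fun x => x) false).Nodup :=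
        (PySem.List.sorted_perm _ _ _).nodup_iff.mpr (List.Nodup.filter _ hnd)
      exact (List.Pairwise.and hle hndf).imp (fun h => lt_of_le_of_ne h.1 h.2)

-- filtering away one offset leaves every other offset's canonical consolidation unchanged
lemma pvMV_filter (l : List (Int × Int × Int)) (o off : Int) (h : off ≠ o) :
    pvMV (l.filter (fun u => u.1 != o)) off = pvMV l off := by
  unfold pvMV
  rw [List.filter_filter]
  have : (fun (u : Int × Int × Int) => u.1 == off && u.1 != o) = (fun u => u.1 == off) := by
    funext u
    by_cases hu : u.1 = off
    · simp [hu, bne, h]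
    · simp [hu]
  rw [this]

-- B's recursion computes the canonical parts over the sorted distinct offsets
lemma pvPartsB_canonical (l : List (Int × Int × Int)) :
    pvPartsB l =
      (PySem.List.sorted (PySem.List.dedup (l.map (·.1))) (fun x => x) false).map
        (fun off => pvFmtB off (pvMV l off).1 (pvMV l off).2) := by
  induction hn : l.length using Nat.strong_induction_on generalizing l with
  | _ n ih =>
  cases l with
  | nil => rw [pvPartsB]; rfl
  | cons t ts =>
    rw [pvPartsB]
    set K := PySem.List.dedup ((t :: ts).map (·.1)) with hK
    obtain ⟨o, hosome⟩ : ∃ o, PySem.List.min? ((t :: ts).map (·.1)) (fun x => x) = some o := by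
      cases h : PySem.List.min? ((t :: ts).map (·.1)) (fun x => x) with
      | none => exact absurd ((PySem.List.min?_eq_none_iff _ _).mp h) (by simp)
      | some o => exact ⟨o, rfl⟩
    have hoD : (PySem.List.min? ((t :: ts).map (·.1)) (fun x => x)).getD 0 = o := by
      rw [hosome]; rfl
    have homem : o ∈ (t :: ts).map (·.1) := PySem.List.min?_mem hosome
    have homin : ∀ y ∈ (t :: ts).map (·.1), o ≤ y := PySem.List.min?_isMin hosome
    have hKnd : K.Nodup := by rw [hK]; simp only [PySem.List.dedup_eq_ofList]; exact PySem.Set.nodup_ofList _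
    have hoK : o ∈ K := by rw [hK]; exact (PySem.List.mem_dedup _ _).mpr homem
    have hominK : ∀ y ∈ K, o ≤ y := fun y hy => homin y ((PySem.List.mem_dedup _ _).mp (hK ▸ hy))
    rw [hoD]
    rw [pvSorted_cons_min K o hKnd hoK hominK]
    rw [List.map_cons]
    congr 1
    have hlen : ((t :: ts).filter (fun u => u.1 != o)).length < n := by
      rw [← hn, ← hoD]
      exact pvFilterMin_lt t ts
    rw [ih _ hlen _ rfl]
    have hfst : ((t :: ts).filter (fun u => u.1 != o)).map (·.1) =
        ((t :: ts).map (·.1)).filter (fun x => x != o) :=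
      pvMapFst_filter (t :: ts) (fun x => x != o)
    have hded : PySem.List.dedup (((t :: ts).filter (fun u => u.1 != o)).map (·.1)) =
        K.filter (fun x => x != o) := by
      rw [hfst, pvDedup_filter, hK]
    rw [hded]
    apply List.map_congr_left
    intro off hoff
    have hoffne : off ≠ o := by
      have : off ∈ K.filter (fun x => x != o) := (PySem.List.mem_sorted _ _ _ _).mp hoff
      have := (List.mem_filter.mp this).2
      simpa [bne] using this
    rw [pvMV_filter _ o off hoffne]

-- ===== VERDICT (by name: the statement is the Claim_ definition above) =====
theorem format_instr_bytes_py_spec : Claim_equal_format_instr_bytes_py := by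
  intro ib _
  unfold Spec_format_instr_bytes_py
  cases ib with
  | nil => rfl
  | cons t ts =>
    rw [pvA_canonical t ts]
    unfold format_instr_bytes_py_alt
    simp only [List.isEmpty_cons, Bool.false_eq_true, if_false]
    rw [pvPartsB_canonical (t :: ts)]
    congr 1
    congr 1
    apply List.map_congr_left
    intro off _
    exact pvFmt_eq off (pvMV (t :: ts) off).1 (pvMV (t :: ts) off).2
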